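-- pv_equiv track=rewrite | github.com/hikaru-212/etl_learning_journey | coding_training/basic/moduleD_iteration_enumeration/drills/lowlevel.py | run_P5_sort_by_len_then_lex
-- ===== SOURCE A (Python) =====
-- def run_P5_sort_by_len_then_lex(words: list[int]) -> list[int]:
--     n = len(words)
--     out = words[:]
--
--     i = 0
--     while i < n-1:
--         j = i+1
--         while j < n:
--             w1 = out[i]
--             w2 = out[j]
--
--             #先比長度
--             len1 = len(w1)
--             len2 = len(w2)
--
--             should_swap = False
--             if len1 > len2:
--                 should_swap = True
--             elif len1 == len2 and w1 > w2:
--                 should_swap = True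
--
--             if should_swap:
--                 temp = out[i]
--                 out[i] = out[j]
--                 out[j] = temp
--
--             j += 1
--
--         i += 1
--     return out
-- ===== SOURCE B (Python) =====
-- def run_P5_sort_by_len_then_lex(words: list) -> list:
--     buckets = {}
--     for w in words:
--         buckets.setdefault(len(w), []).append(w)
--     result = []
--     for length in sorted(buckets):
--         result.extend(sorted(buckets[length]))
--     return result
-- ===== Notes on version B (the rewrite author's own statement) =====
-- stated objective: faster
-- what changed: Replaces A's quadratic pairwise swap scans with a single bucketing pass grouping words by length, then concatenating each length bucket sorted lexicographically in ascending length order.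
import Mathlib
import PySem

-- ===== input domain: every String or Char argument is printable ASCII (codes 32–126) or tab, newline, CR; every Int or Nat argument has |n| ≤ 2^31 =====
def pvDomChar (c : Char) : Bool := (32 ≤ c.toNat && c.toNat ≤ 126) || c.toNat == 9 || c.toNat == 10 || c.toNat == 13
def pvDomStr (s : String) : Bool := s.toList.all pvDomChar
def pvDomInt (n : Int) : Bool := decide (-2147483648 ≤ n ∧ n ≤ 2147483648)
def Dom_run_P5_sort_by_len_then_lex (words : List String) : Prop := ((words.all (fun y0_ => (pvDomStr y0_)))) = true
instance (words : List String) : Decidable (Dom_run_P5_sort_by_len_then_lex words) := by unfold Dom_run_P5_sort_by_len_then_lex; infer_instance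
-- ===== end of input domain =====

-- B replaces A's quadratic selection-sort swap scans by one grouping pass into
-- length buckets followed by lexicographic sorting of each bucket (faster).

-- ===== PORT A =====
-- A's inner 'while j < n' loop: compare out[i] with out[j], swap when out of order.
def pvA_shouldSwap (w1 w2 : String) : Bool :=
  if PySem.Str.len w1 > PySem.Str.len w2 then true
  else if PySem.Str.len w1 == PySem.Str.len w2 && decide (w2 < w1) then true
  else false

def pvA_inner (out : List String) (i j n : Nat) : List String :=
  if h : j < n then
    let w1 := out.getD i ""
    let w2 := out.getD j ""
    let out' := if pvA_shouldSwap w1 w2 then (out.set i w2).set j w1 else out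
    pvA_inner out' i (j + 1) n
  else out
  termination_by n - j
  decreasing_by omega

-- A's outer 'while i < n-1' loop.
def pvA_outer (out : List String) (i n : Nat) : List String :=
  if h : i < n - 1 then pvA_outer (pvA_inner out i (i + 1) n) (i + 1) n else out
  termination_by n - 1 - i
  decreasing_by omega

def run_P5_sort_by_len_then_lex (words : List String) : List String :=
  pvA_outer words 0 words.length

-- ===== PORT B =====
-- buckets.setdefault(len(w), []).append(w) ≡ buckets[len(w)] = buckets.get(len(w), []) + [w]
def pvB_buckets (words : List String) : PySem.Dict Int (List String) :=
  words.foldl (fun d w => d.modify (PySem.Str.len w) [] (fun b => b ++ [w])) PySem.Dict.empty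

def run_P5_sort_by_len_then_lex_alt (words : List String) : List String :=
  let buckets := pvB_buckets words
  (PySem.List.sorted buckets.keys (fun x => x) false).foldl
    (fun acc L => acc ++ PySem.List.sorted (buckets.getD L []) (fun x => x) false) []

-- ===== PRECONDITION & SPEC =====
def Spec_run_P5_sort_by_len_then_lex (words : List String) (out : List String) : Prop := out = run_P5_sort_by_len_then_lex_alt words
instance (words : List String) (out : List String) : Decidable (Spec_run_P5_sort_by_len_then_lex words out) := by unfold Spec_run_P5_sort_by_len_then_lex; infer_instance

-- ===== CLAIM (what is proved, stated in full; the proofs are below) =====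
def Claim_equal_run_P5_sort_by_len_then_lex : Prop := ∀ (words : List String), Dom_run_P5_sort_by_len_then_lex words → Spec_run_P5_sort_by_len_then_lex words (run_P5_sort_by_len_then_lex words)

-- ===== LEMMAS AND PROOFS =====

-- the sort key of both programs: length first, then the string itself, lexicographically
def pvKey (w : String) : Lex (Int × String) := toLex (PySem.Str.len w, w)

theorem pvKey_injective : Function.Injective pvKey := by
  intro a b h
  simpa [pvKey, Prod.ext_iff] using congrArg (fun k => (ofLex k).2) h

theorem pvKey_lt_iff (a b : String) :
    pvKey a < pvKey b ↔ (PySem.Str.len a < PySem.Str.len b ∨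
      (PySem.Str.len a = PySem.Str.len b ∧ a < b)) := by
  simp [pvKey, Prod.Lex.lt_iff]

theorem pvKey_le_iff (a b : String) :
    pvKey a ≤ pvKey b ↔ (PySem.Str.len a < PySem.Str.len b ∨
      (PySem.Str.len a = PySem.Str.len b ∧ a ≤ b)) := by
  simp [pvKey, Prod.Lex.le_iff]

theorem pvA_shouldSwap_iff (w1 w2 : String) :
    pvA_shouldSwap w1 w2 = true ↔ pvKey w2 < pvKey w1 := by
  rw [pvKey_lt_iff]
  unfold pvA_shouldSwap
  simp only [PySem.Str.len_eq, String.length_toList, gt_iff_lt]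
  split_ifs with h1 h2
  · exact iff_of_true rfl (Or.inl h1)
  · rw [Bool.and_eq_true, beq_iff_eq, decide_eq_true_eq] at h2
    exact iff_of_true rfl (Or.inr ⟨h2.1.symm, h2.2⟩)
  · rw [Bool.and_eq_true, beq_iff_eq, decide_eq_true_eq] at h2
    refine iff_of_false (by simp) ?_
    rw [not_or]
    exact ⟨h1, fun he => (not_and.mp h2) he.1.symm he.2⟩

-- the functional content of A's inner loop: one selection scan
def pvSel (x : String) (S : List String) : String × List String :=
  match S with
  | [] => (x, [])
  | s :: S' =>
    if pvA_shouldSwap x s then ((pvSel s S').1, x :: (pvSel s S').2)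
    else ((pvSel x S').1, s :: (pvSel x S').2)

theorem pvSel_perm (x : String) (S : List String) :
    ((pvSel x S).1 :: (pvSel x S).2).Perm (x :: S) := by
  induction S generalizing x with
  | nil => simp [pvSel]
  | cons s S' ih =>
    unfold pvSel
    split_ifs with h
    · show ((pvSel s S').1 :: x :: (pvSel s S').2).Perm (x :: s :: S')
      exact (List.Perm.swap _ _ _).trans ((ih s).cons x)
    · show ((pvSel x S').1 :: s :: (pvSel x S').2).Perm (x :: s :: S')
      exact ((List.Perm.swap _ _ _).trans ((ih x).cons s)).trans (List.Perm.swap _ _ _)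

theorem pvSel_min (x : String) (S : List String) :
    ∀ y ∈ x :: S, pvKey (pvSel x S).1 ≤ pvKey y := by
  induction S generalizing x with
  | nil => intro y hy; simp at hy; simp [pvSel, hy]
  | cons s S' ih =>
    intro y hy
    rw [List.mem_cons, List.mem_cons] at hy
    unfold pvSel
    split_ifs with h
    · show pvKey (pvSel s S').1 ≤ pvKey y
      rw [pvA_shouldSwap_iff] at h
      rcases hy with hy0 | hy1 | hy2
      · subst hy0
        exact le_of_lt (lt_of_le_of_lt (ih s s (List.mem_cons_self)) h)
      · exact ih s y (by simp [hy1])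
      · exact ih s y (by simp [hy2])
    · show pvKey (pvSel x S').1 ≤ pvKey y
      rw [pvA_shouldSwap_iff, not_lt] at h
      rcases hy with hy0 | hy1 | hy2
      · subst hy0
        exact ih y y (List.mem_cons_self)
      · exact (ih x x (List.mem_cons_self)).trans (hy1 ▸ h)
      · exact ih x y (by simp [hy2])

-- positional access/update at the junction of an append
theorem pv_getD_append_len (P R : List String) (x : String) (d : String) :
    (P ++ x :: R).getD P.length d = x := by
  induction P with
  | nil => rfl
  | cons p P _ => simp

theorem pv_set_append_len (P R : List String) (x v : String) :
    (P ++ x :: R).set P.length v = P ++ v :: R := by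
  induction P with
  | nil => rfl
  | cons p P ih => simp [ih]

theorem pvA_inner_spec (S : List String) :
    ∀ (M : List String) (x : String) (P : List String) (n : Nat),
      n = P.length + 1 + M.length + S.length →
      pvA_inner (P ++ x :: (M ++ S)) P.length (P.length + 1 + M.length) n
        = P ++ (pvSel x S).1 :: (M ++ (pvSel x S).2) := by
  induction S with
  | nil =>
    intro M x P n hn
    simp only [List.length_nil] at hn
    rw [pvA_inner, dif_neg (by omega)]
    simp [pvSel]
  | cons s S' ih =>
    intro M x P n hn
    simp only [List.length_cons] at hn
    have hassoc : P ++ x :: (M ++ s :: S') = (P ++ x :: M) ++ s :: S' := by simp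
    have hj : P.length + 1 + M.length = (P ++ x :: M).length := by rw [List.length_append, List.length_cons]; omega
    have hw1 : (P ++ x :: (M ++ s :: S')).getD P.length "" = x := pv_getD_append_len P _ x ""
    have hw2 : (P ++ x :: (M ++ s :: S')).getD (P.length + 1 + M.length) "" = s := by
      rw [hassoc, hj]; exact pv_getD_append_len _ _ s ""
    rw [pvA_inner, dif_pos (by omega)]
    simp only [hw1, hw2]
    by_cases hs : pvA_shouldSwap x s
    · rw [if_pos hs]
      have hset1 : (P ++ x :: (M ++ s :: S')).set P.length s = P ++ s :: (M ++ s :: S') :=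
        pv_set_append_len P _ x s
      have hassoc' : P ++ s :: (M ++ s :: S') = (P ++ s :: M) ++ s :: S' := by simp
      have hj' : P.length + 1 + M.length = (P ++ s :: M).length := by rw [List.length_append, List.length_cons]; omega
      have hset2 : (P ++ s :: (M ++ s :: S')).set (P.length + 1 + M.length) x
          = P ++ s :: ((M ++ [x]) ++ S') := by
        rw [hassoc', hj', pv_set_append_len]; simp
      rw [hset1, hset2]
      have hlen : P.length + 1 + M.length + 1 = P.length + 1 + (M ++ [x]).length := by simp; omega
      rw [hlen, ih (M ++ [x]) s P n (by simp at hn ⊢; omega)]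
      conv_rhs => rw [pvSel]
      rw [if_pos hs]
      simp
    · rw [if_neg hs]
      have hre : P ++ x :: (M ++ s :: S') = P ++ x :: ((M ++ [s]) ++ S') := by simp
      have hlen : P.length + 1 + M.length + 1 = P.length + 1 + (M ++ [s]).length := by simp; omega
      rw [hre, hlen, ih (M ++ [s]) x P n (by simp at hn ⊢; omega)]
      conv_rhs => rw [pvSel]
      rw [if_neg hs]
      simp

theorem pvA_outer_sorted (k : Nat) :
    ∀ (out : List String) (i n : Nat), out.length = n → n - 1 - i = k →
      List.Pairwise (fun a b => pvKey a ≤ pvKey b) (out.take i) →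
      (∀ p ∈ out.take i, ∀ r ∈ out.drop i, pvKey p ≤ pvKey r) →
      (pvA_outer out i n).Perm out ∧
        List.Pairwise (fun a b => pvKey a ≤ pvKey b) (pvA_outer out i n) := by
  induction k with
  | zero =>
    intro out i n hlen hk hpre hcross
    rw [pvA_outer, dif_neg (by omega)]
    refine ⟨List.Perm.refl _, ?_⟩
    rw [← List.take_append_drop i out, List.pairwise_append]
    refine ⟨hpre, ?_, fun p hp r hr => hcross p hp r hr⟩
    have hlen1 : (out.drop i).length ≤ 1 := by rw [List.length_drop]; omega
    rcases hdrop : out.drop i with _ | ⟨a, _ | ⟨b, t⟩⟩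
    · simp
    · simp
    · rw [hdrop] at hlen1; simp at hlen1
  | succ k ihk =>
    intro out i n hlen hk hpre hcross
    have hi : i < n - 1 := by omega
    have hilen : i < out.length := by omega
    rw [pvA_outer, dif_pos hi]
    have hx : out[i] :: out.drop (i + 1) = out.drop i := List.getElem_cons_drop hilen
    have hdecomp : out = out.take i ++ out[i] :: out.drop (i + 1) := by
      rw [hx, List.take_append_drop]
    have hP : (out.take i).length = i := by rw [List.length_take]; omega
    have hinner : pvA_inner out i (i + 1) n
        = out.take i ++ (pvSel out[i] (out.drop (i + 1))).1
            :: ([] ++ (pvSel out[i] (out.drop (i + 1))).2) := by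
      have h0 := pvA_inner_spec (out.drop (i + 1)) [] out[i] (out.take i) n
        (by rw [List.length_drop]; simp; omega)
      rw [hP] at h0
      simp only [List.length_nil, Nat.add_zero, List.nil_append] at h0
      rw [← hdecomp] at h0
      simpa using h0
    set m := (pvSel out[i] (out.drop (i + 1))).1 with hm
    set t := (pvSel out[i] (out.drop (i + 1))).2 with ht
    set P := out.take i with hPdef
    have hselperm : (m :: t).Perm (out[i] :: out.drop (i + 1)) := pvSel_perm _ _
    have hpermout : (P ++ m :: t).Perm out := by
      conv_rhs => rw [hdecomp]
      exact hselperm.append_left P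
    have hmemsel : ∀ y ∈ m :: t, y ∈ out.drop i := by
      intro y hy; rw [← hx]; exact hselperm.mem_iff.mp hy
    have hmini : ∀ y ∈ m :: t, pvKey m ≤ pvKey y := by
      intro y hy
      exact pvSel_min out[i] (out.drop (i + 1)) y (hselperm.mem_iff.mp hy)
    have htake : (P ++ m :: t).take (i + 1) = P ++ [m] := by
      rw [show i + 1 = P.length + 1 by omega, List.take_append]
      simp
    have hdrop2 : (P ++ m :: t).drop (i + 1) = t := by
      rw [show i + 1 = P.length + 1 by omega, List.drop_append]
      simp
    have hres := ihk (P ++ m :: t) (i + 1) n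
      (by rw [hpermout.length_eq]; omega)
      (by omega)
      (by
        rw [htake, List.pairwise_append]
        refine ⟨hpre, by simp, ?_⟩
        intro p hp y hy
        rw [List.mem_singleton] at hy
        subst hy
        exact hcross p hp m (hmemsel m (List.mem_cons_self)))
      (by
        intro p hp r hr
        rw [htake] at hp
        rw [hdrop2] at hr
        rcases List.mem_append.mp hp with hp | hp
        · exact hcross p hp r (hmemsel r (List.mem_cons_of_mem m hr))
        · rw [List.mem_singleton] at hp
          subst hp
          exact hmini r (List.mem_cons_of_mem m hr))
    rw [hinner]
    simp only [List.nil_append]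
    exact ⟨hres.1.trans hpermout, hres.2⟩

theorem pvA_result (words : List String) :
    (run_P5_sort_by_len_then_lex words).Perm words ∧
      List.Pairwise (fun a b => pvKey a ≤ pvKey b) (run_P5_sort_by_len_then_lex words) := by
  have := pvA_outer_sorted (words.length - 1 - 0) words 0 words.length rfl rfl
    (by simp) (by simp)
  simpa [run_P5_sort_by_len_then_lex] using this

-- ===== B-side lemmas =====
theorem pvB_getD (words : List String) (c : Int) :
    (pvB_buckets words).getD c [] = words.filter (fun w => PySem.Str.len w == c) := by
  unfold pvB_buckets
  rw [← List.foldl_map (f := fun w => (PySem.Str.len w, w))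
    (g := fun (d : PySem.Dict Int (List String)) (p : Int × String) =>
      d.modify p.1 [] (fun b => b ++ [p.2]))]
  rw [PySem.Dict.getD_foldl_modify_append, PySem.Dict.getD_empty]
  rw [List.filter_map]
  simp [Function.comp_def]

theorem pvB_keys (words : List String) :
    (pvB_buckets words).keys = PySem.Set.ofList (words.map PySem.Str.len) := by
  unfold pvB_buckets
  rw [PySem.Dict.keys_foldl_modify_key words PySem.Str.len [] (fun _ w => (fun b => b ++ [w]))]
  rw [PySem.Dict.keys_empty, PySem.Set.update_nil_left]

theorem pv_group_perm (ks : List Int) :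
    ∀ (ws : List String), ks.Nodup →
      (∀ w ∈ ws, PySem.Str.len w ∈ ks) →
      (ks.flatMap (fun L => ws.filter (fun w => PySem.Str.len w == L))).Perm ws := by
  induction ks with
  | nil =>
    intro ws _ hall
    have : ws = [] := List.eq_nil_iff_forall_not_mem.mpr (fun w hw => by simpa using hall w hw)
    subst this
    simp
  | cons kk ks ih =>
    intro ws hnd hall
    rw [List.flatMap_cons]
    have hnd' := List.nodup_cons.mp hnd
    have hstep : ∀ L ∈ ks, ws.filter (fun w => PySem.Str.len w == L)
        = (ws.filter (fun w => !(PySem.Str.len w == kk))).filter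
            (fun w => PySem.Str.len w == L) := by
      intro L hL
      have hne : L ≠ kk := by rintro rfl; exact hnd'.1 hL
      rw [List.filter_filter]
      apply List.filter_congr
      intro w _
      simp
      intro he hk
      exact hne (he.symm.trans hk)
    have hmap : ks.flatMap (fun L => ws.filter (fun w => PySem.Str.len w == L))
        = ks.flatMap (fun L => (ws.filter (fun w => !(PySem.Str.len w == kk))).filter
            (fun w => PySem.Str.len w == L)) := List.flatMap_congr hstep
    rw [hmap]
    have hih := ih (ws.filter (fun w => !(PySem.Str.len w == kk))) hnd'.2
      (fun w hw => by
        have hmem := hall w (List.mem_of_mem_filter hw)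
        have hkk := (List.mem_filter.mp hw).2
        simp only [Bool.not_eq_eq_eq_not, Bool.not_true, beq_eq_false_iff_ne, ne_eq] at hkk
        rcases List.mem_cons.mp hmem with h | h
        · exact absurd h hkk
        · exact h)
    exact (hih.append_left _).trans
      (List.filter_append_perm (fun w => PySem.Str.len w == kk) ws)

theorem pvB_result (words : List String) :
    (run_P5_sort_by_len_then_lex_alt words).Perm words ∧
      List.Pairwise (fun a b => pvKey a ≤ pvKey b) (run_P5_sort_by_len_then_lex_alt words) := by
  have halt : run_P5_sort_by_len_then_lex_alt words
      = (PySem.List.sorted (pvB_buckets words).keys (fun x => x) false).flatMap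
          (fun L => PySem.List.sorted ((pvB_buckets words).getD L []) (fun x => x) false) := by
    unfold run_P5_sort_by_len_then_lex_alt
    rw [PySem.List.foldl_append_eq_flatMap]
    simp
  have hkeysnd : (pvB_buckets words).keys.Nodup := by
    rw [pvB_keys]; exact PySem.Set.nodup_ofList _
  have hksperm : (PySem.List.sorted (pvB_buckets words).keys (fun x => x) false).Perm
      (pvB_buckets words).keys := PySem.List.sorted_perm _ _ _
  have hksnd : (PySem.List.sorted (pvB_buckets words).keys (fun x => x) false).Nodup :=
    hksperm.symm.nodup hkeysnd
  have hksle : List.Pairwise (fun a b => a ≤ b)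
      (PySem.List.sorted (pvB_buckets words).keys (fun x => x) false) :=
    PySem.List.sorted_pairwise _ _
  have hkslt : List.Pairwise (fun a b => a < b)
      (PySem.List.sorted (pvB_buckets words).keys (fun x => x) false) :=
    (hksle.and hksnd).imp (fun h => lt_of_le_of_ne h.1 h.2)
  have hmemlen : ∀ (L : Int) (x : String),
      x ∈ PySem.List.sorted ((pvB_buckets words).getD L []) (fun x => x) false →
        PySem.Str.len x = L := by
    intro L x hx
    have := (PySem.List.sorted_perm _ _ _).mem_iff.mp hx
    rw [pvB_getD] at this
    exact beq_iff_eq.mp (List.mem_filter.mp this).2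
  constructor
  · rw [halt]
    have h1 : ((PySem.List.sorted (pvB_buckets words).keys (fun x => x) false).flatMap
        (fun L => PySem.List.sorted ((pvB_buckets words).getD L []) (fun x => x) false)).Perm
        ((PySem.List.sorted (pvB_buckets words).keys (fun x => x) false).flatMap
          (fun L => words.filter (fun w => PySem.Str.len w == L))) :=
      List.Perm.flatMap_left _ (fun L _ => by
        rw [pvB_getD]; exact PySem.List.sorted_perm _ _ _)
    refine h1.trans (pv_group_perm _ words hksnd ?_)
    intro w hw
    rw [hksperm.mem_iff, pvB_keys, PySem.Set.mem_ofList]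
    exact List.mem_map_of_mem hw
  · rw [halt, List.flatMap_def, List.pairwise_flatten]
    constructor
    · intro l' hl'
      rcases List.mem_map.mp hl' with ⟨L, _, rfl⟩
      have hsle : List.Pairwise (fun (a b : String) => a ≤ b)
          (PySem.List.sorted ((pvB_buckets words).getD L []) (fun x => x) false) :=
        PySem.List.sorted_pairwise _ _
      refine hsle.imp_of_mem ?_
      intro a b ha hb hab
      rw [pvKey_le_iff]
      exact Or.inr ⟨(hmemlen L a ha).trans (hmemlen L b hb).symm, hab⟩
    · rw [List.pairwise_map]
      refine hkslt.imp_of_mem ?_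
      intro L1 L2 _ _ hlt x hx y hy
      rw [pvKey_le_iff]
      exact Or.inl (by rw [hmemlen L1 x hx, hmemlen L2 y hy]; exact hlt)

-- ===== VERDICT (by name: the statement is the Claim_ definition above) =====
theorem run_P5_sort_by_len_then_lex_spec : Claim_equal_run_P5_sort_by_len_then_lex := by
  intro words _
  unfold Spec_run_P5_sort_by_len_then_lex
  obtain ⟨hpa, hsa⟩ := pvA_result words
  obtain ⟨hpb, hsb⟩ := pvB_result words
  exact (PySem.List.eq_of_perm_of_pairwise_le_of_injective pvKey pvKey_injective
    (hpa.trans hpb.symm) hsa hsb)
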